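-- pv_equiv track=rewrite | github.com/LING-LITONG/Gobang | main.py | find_pos2
-- ===== SOURCE A (Python) =====
-- def find_pos2(x,y):
--     #找到显示的可以落子的位置
--     for i in range(10,570,40):
--         for j in range(10,570,40):
--             L1=i-22
--             L2=i+22
--             R1=j-22
--             R2=j+22
--             if x>=L1 and x<=L2 and y>=R1 and y<=R2:
--                 return i,j
--     return x,y
-- ===== SOURCE B (Python) =====
-- def find_pos2(x, y):
--     # snap v to the first grid center c = 10+40k (0<=k<=13) whose window [c-22,c+22] contains v
--     def snap(v):
--         k = -((32 - v) // 40)   # ceil((v-32)/40): smallest k with 10+40k >= v-22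
--         if k < 0:
--             k = 0
--         c = 10 + 40 * k
--         if k <= 13 and c - 22 <= v <= c + 22:
--             return c
--         return None
--     i = snap(x)
--     j = snap(y)
--     if i is not None and j is not None:
--         return i, j
--     return x, y
-- ===== Notes on version B (the rewrite author's own statement) =====
-- stated objective: faster
-- what changed: Replaced the nested 14x14 scan over all grid intersections with direct arithmetic: a ceiling division computes for each coordinate the smallest grid center whose window contains it.
import Mathlib
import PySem

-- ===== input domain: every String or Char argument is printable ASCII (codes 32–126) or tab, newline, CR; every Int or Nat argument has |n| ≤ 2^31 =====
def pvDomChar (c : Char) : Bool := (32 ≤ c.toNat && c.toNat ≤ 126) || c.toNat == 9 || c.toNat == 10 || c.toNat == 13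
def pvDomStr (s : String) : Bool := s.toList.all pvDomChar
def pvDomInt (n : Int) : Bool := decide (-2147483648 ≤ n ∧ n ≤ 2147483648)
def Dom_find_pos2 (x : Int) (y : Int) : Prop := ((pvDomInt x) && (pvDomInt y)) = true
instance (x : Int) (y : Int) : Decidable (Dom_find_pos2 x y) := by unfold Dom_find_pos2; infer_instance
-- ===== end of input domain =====

-- B replaces A's nested scan over all 14×14 grid intersections with one ceiling division per coordinate (objective: faster).

-- ===== PORT A =====
-- inner loop: for j in js, return (i,j) at the first j passing the window test (exact port of A's if)
def findPos2LoopJ (x : Int) (y : Int) (i : Int) : List Int → Option (Int × Int)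
  | [] => none
  | j :: js =>
    if x ≥ i - 22 ∧ x ≤ i + 22 ∧ y ≥ j - 22 ∧ y ≤ j + 22 then some (i, j)
    else findPos2LoopJ x y i js

-- outer loop: for i in is, run the inner loop over the full j range
def findPos2LoopI (x : Int) (y : Int) : List Int → Option (Int × Int)
  | [] => none
  | i :: is =>
    match findPos2LoopJ x y i (PySem.List.pyRange 10 570 40) with
    | some p => some p
    | none => findPos2LoopI x y is

def find_pos2 (x : Int) (y : Int) : Int × Int :=
  match findPos2LoopI x y (PySem.List.pyRange 10 570 40) with
  | some p => p
  | none => (x, y)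

-- ===== PORT B =====
def findPos2Snap (v : Int) : Option Int :=
  let k0 := -(PySem.Int.floordiv (32 - v) 40)   -- ceil((v-32)/40), as in Source B's -((32 - v) // 40)
  let k := if k0 < 0 then 0 else k0
  let c := 10 + 40 * k
  if k ≤ 13 ∧ c - 22 ≤ v ∧ v ≤ c + 22 then some c else none

def find_pos2_alt (x : Int) (y : Int) : Int × Int :=
  match findPos2Snap x, findPos2Snap y with
  | some i, some j => (i, j)
  | _, _ => (x, y)

-- ===== PRECONDITION & SPEC =====
def Spec_find_pos2 (x : Int) (y : Int) (out : Int × Int) : Prop := out = find_pos2_alt x y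
instance (x : Int) (y : Int) (out : Int × Int) : Decidable (Spec_find_pos2 x y out) := by unfold Spec_find_pos2; infer_instance

-- ===== CLAIM (what is proved, stated in full; the proofs are below) =====
def Claim_equal_find_pos2 : Prop := ∀ (x : Int) (y : Int), Dom_find_pos2 x y → Spec_find_pos2 x y (find_pos2 x y)

-- ===== LEMMAS AND PROOFS =====

-- first center c in cs whose window [c-22, c+22] contains v
def findPos2First (v : Int) : List Int → Option Int
  | [] => none
  | c :: cs => if v ≥ c - 22 ∧ v ≤ c + 22 then some c else findPos2First v cs

theorem findPos2LoopJ_eq (x y i : Int) (js : List Int) :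
    findPos2LoopJ x y i js =
      if x ≥ i - 22 ∧ x ≤ i + 22 then (findPos2First y js).map (fun j => (i, j)) else none := by
  induction js with
  | nil =>
    rw [findPos2LoopJ, findPos2First]
    split <;> rfl
  | cons j js ih =>
    rw [findPos2LoopJ, findPos2First, ih]
    by_cases hx : x ≥ i - 22 ∧ x ≤ i + 22
    · by_cases hy : y ≥ j - 22 ∧ y ≤ j + 22
      · rw [if_pos ⟨hx.1, hx.2, hy.1, hy.2⟩, if_pos hx, if_pos hy]; rfl
      · rw [if_neg (fun h => hy ⟨h.2.2.1, h.2.2.2⟩), if_pos hx, if_pos hx, if_neg hy]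
    · rw [if_neg (fun h => hx ⟨h.1, h.2.1⟩), if_neg hx, if_neg hx]

theorem findPos2LoopI_eq (x y : Int) (is : List Int) :
    findPos2LoopI x y is =
      match findPos2First x is, findPos2First y (PySem.List.pyRange 10 570 40) with
      | some i, some j => some (i, j)
      | _, _ => none := by
  induction is with
  | nil => rw [findPos2LoopI, findPos2First]
  | cons i is ih =>
    rw [findPos2LoopI, findPos2LoopJ_eq, findPos2First, ih]
    by_cases hx : x ≥ i - 22 ∧ x ≤ i + 22
    · rw [if_pos hx, if_pos hx]
      cases findPos2First y (PySem.List.pyRange 10 570 40) with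
      | none => cases findPos2First x is <;> rfl
      | some j => rfl
    · rw [if_neg hx, if_neg hx]

theorem findPos2FirstNone (v : Int) (cs : List Int) (h : ∀ c ∈ cs, ¬(v ≥ c - 22 ∧ v ≤ c + 22)) :
    findPos2First v cs = none := by
  induction cs with
  | nil => rfl
  | cons c cs ih =>
    rw [findPos2First, if_neg (h c (by simp))]
    exact ih fun c' hc' => h c' (by simp [hc'])

theorem pyRange_grid : PySem.List.pyRange 10 570 40 =
    [10, 50, 90, 130, 170, 210, 250, 290, 330, 370, 410, 450, 490, 530] := by decide

set_option maxHeartbeats 4000000 in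
theorem findPos2First_eq_snap (v : Int) :
    findPos2First v (PySem.List.pyRange 10 570 40) = findPos2Snap v := by
  rw [pyRange_grid]
  have hfd : PySem.Int.floordiv (32 - v) 40 = (32 - v) / 40 :=
    PySem.Int.floordiv_eq_ediv_of_pos (by omega)
  rcases Int.lt_or_le v (-12) with hv | hv
  · rw [findPos2FirstNone v _ (by intro c hc; fin_cases hc <;> omega)]
    have hk : -((32 - v) / 40) < 0 := by omega
    simp only [findPos2Snap, hfd, if_pos hk]
    rw [if_neg (by omega)]
  rcases Int.lt_or_le (552 : Int) v with hv2 | hv2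
  · rw [findPos2FirstNone v _ (by intro c hc; fin_cases hc <;> omega)]
    have hk : ¬(-((32 - v) / 40) < 0) := by omega
    simp only [findPos2Snap, hfd, if_neg hk]
    rw [if_neg (by omega)]
  · interval_cases v <;> decide

-- ===== VERDICT (by name: the statement is the Claim_ definition above) =====
theorem find_pos2_spec : Claim_equal_find_pos2 := by
  intro x y _
  unfold Spec_find_pos2 find_pos2 find_pos2_alt
  rw [findPos2LoopI_eq, findPos2First_eq_snap, findPos2First_eq_snap]
  cases findPos2Snap x <;> cases findPos2Snap y <;> rfl
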